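-- pv_equiv track=rewrite | github.com/BalaShankar9/SecProbe | secprobe/core/session_manager.py | _check_sequential
-- ===== SOURCE A (Python) =====
-- def _check_sequential(token: str) -> bool:
--     """Check for sequential patterns in token."""
--     # Check for incrementing digits
--     digits = "".join(c for c in token if c.isdigit())
--     if len(digits) > 4:
--         for i in range(len(digits) - 3):
--             if all(int(digits[j + 1]) - int(digits[j]) == 1
--                    for j in range(i, i + 3)
--                    if digits[j].isdigit() and digits[j + 1].isdigit()):
--                 return True
--     return False
-- ===== SOURCE B (Python) =====
-- def _check_sequential(token: str) -> bool:
--     """Check for sequential patterns in token."""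
--     digits = "".join(c for c in token if c.isdigit())
--     if len(digits) > 4:
--         run = 0
--         for a, b in zip(digits, digits[1:]):
--             if int(b) - int(a) == 1:
--                 run += 1
--                 if run == 3:
--                     return True
--             else:
--                 run = 0
--     return False
-- ===== Notes on version B (the rewrite author's own statement) =====
-- stated objective: simpler
-- what changed: Replaces the nested fixed-window scan (every start index i re-tested by an inner 3-step all() with redundant isdigit guards) by a single pass over adjacent digit pairs that maintains a run counter of consecutive +1 steps and returns True when it reaches 3.
import Mathlib
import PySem

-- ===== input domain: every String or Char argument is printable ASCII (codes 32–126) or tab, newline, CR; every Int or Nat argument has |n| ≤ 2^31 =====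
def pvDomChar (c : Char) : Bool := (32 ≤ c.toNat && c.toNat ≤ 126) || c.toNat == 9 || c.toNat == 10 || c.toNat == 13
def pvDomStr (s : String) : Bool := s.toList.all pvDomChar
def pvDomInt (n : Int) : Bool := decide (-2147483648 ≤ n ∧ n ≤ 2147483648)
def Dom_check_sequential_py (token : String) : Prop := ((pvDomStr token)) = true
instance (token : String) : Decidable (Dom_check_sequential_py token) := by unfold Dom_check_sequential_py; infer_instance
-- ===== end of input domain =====

-- B replaces A's nested fixed-window scan by a single pass over adjacent digit pairs
-- keeping a run counter of consecutive +1 steps (objective: simpler).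

-- int(c) for a one-character string c (exact when c is a digit, which is the only way both programs call it)
def pvInt1 (c : Char) : Int := (PySem.Int.ofChars? [c]).getD 0

-- ===== PORT A =====
def check_sequential_py (token : String) : Bool :=
  let digits : List Char := token.toList.filter (fun c => PySem.Chars.isdigit c)
  if 4 < digits.length then
    (PySem.List.pyRange 0 ((digits.length : Int) - 3)).any (fun i =>
      ((PySem.List.pyRange i (i + 3)).filter (fun j =>
          PySem.Chars.isdigit (PySem.List.pyGetD digits j '0') &&
          PySem.Chars.isdigit (PySem.List.pyGetD digits (j + 1) '0'))).all (fun j =>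
        pvInt1 (PySem.List.pyGetD digits (j + 1) '0') - pvInt1 (PySem.List.pyGetD digits j '0') == 1))
  else false

-- ===== PORT B =====
def pvRunLoop : List (Char × Char) → Nat → Bool
  | [], _ => false
  | (a, b) :: ps, run =>
      if pvInt1 b - pvInt1 a == 1 then
        (if run + 1 == 3 then true else pvRunLoop ps (run + 1))
      else pvRunLoop ps 0

def check_sequential_py_alt (token : String) : Bool :=
  let digits : List Char := token.toList.filter (fun c => PySem.Chars.isdigit c)
  if 4 < digits.length then pvRunLoop (digits.zip digits.tail) 0 else false

-- ===== PRECONDITION & SPEC =====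
def Spec_check_sequential_py (token : String) (out : Bool) : Prop := out = check_sequential_py_alt token
instance (token : String) (out : Bool) : Decidable (Spec_check_sequential_py token out) := by unfold Spec_check_sequential_py; infer_instance

-- ===== CLAIM (what is proved, stated in full; the proofs are below) =====
def Claim_equal_check_sequential_py : Prop := ∀ (token : String), Dom_check_sequential_py token → Spec_check_sequential_py token (check_sequential_py token)

-- ===== LEMMAS AND PROOFS =====

-- a pair of consecutive digits forming a +1 step
def pvGoodp (p : Char × Char) : Bool := pvInt1 p.2 - pvInt1 p.1 == 1

-- the first m pairs are all +1 steps
def pvPre : List (Char × Char) → Nat → Bool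
  | _, 0 => true
  | [], _ + 1 => false
  | p :: ps, m + 1 => pvGoodp p && pvPre ps m

-- somewhere three consecutive +1 steps
def pvW : List (Char × Char) → Bool
  | p :: q :: r :: rest => (pvGoodp p && pvGoodp q && pvGoodp r) || pvW (q :: r :: rest)
  | _ => false

def pvStep (ds : List Char) (k : Nat) : Bool :=
  pvInt1 (ds.getD (k + 1) '0') - pvInt1 (ds.getD k '0') == 1

theorem pvPre_one_of_two (ps : List (Char × Char)) (h : pvPre ps 2 = true) :
    pvPre ps 1 = true := by
  match ps with
  | [] => simp [pvPre] at h
  | p :: ps => simp [pvPre] at h ⊢; exact h.1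

theorem pvW_cons (p : Char × Char) (ps : List (Char × Char)) :
    pvW (p :: ps) = ((pvGoodp p && pvPre ps 2) || pvW ps) := by
  match ps with
  | [] => simp [pvW, pvPre]
  | [q] => simp [pvW, pvPre]
  | q :: r :: t => simp [pvW, pvPre]; cases pvGoodp p <;> cases pvGoodp q <;>
      cases pvGoodp r <;> simp

theorem pvRunLoop_eq_pvW (ps : List (Char × Char)) :
    (pvRunLoop ps 2 = (pvPre ps 1 || pvW ps)) ∧
    (pvRunLoop ps 1 = (pvPre ps 2 || pvW ps)) ∧
    (pvRunLoop ps 0 = pvW ps) := by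
  induction ps with
  | nil => simp [pvRunLoop, pvPre, pvW]
  | cons p ps ih =>
    obtain ⟨ih2, ih1, ih0⟩ := ih
    by_cases hp : pvGoodp p = true
    · have hp' : (pvInt1 p.2 - pvInt1 p.1 == 1) = true := hp
      refine ⟨?_, ?_, ?_⟩ <;>
        simp only [pvRunLoop, pvW_cons, pvPre, hp', hp, if_pos, Bool.true_and] <;>
        simp [ih2, ih1]
      cases hq2 : pvPre ps 2
      · simp
      · simp [pvPre_one_of_two ps hq2]
    · have hp' : (pvInt1 p.2 - pvInt1 p.1 == 1) = false := by
        simpa [pvGoodp] using hp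
      refine ⟨?_, ?_, ?_⟩ <;>
        simp [pvRunLoop, pvW_cons, pvPre, hp', hp, ih0]

theorem pvPre_two_iff (ps : List (Char × Char)) :
    pvPre ps 2 = true ↔ 2 ≤ ps.length ∧
      pvGoodp (ps.getD 0 ('0', '0')) = true ∧ pvGoodp (ps.getD 1 ('0', '0')) = true := by
  match ps with
  | [] => simp [pvPre]
  | [q] => simp [pvPre]
  | q :: r :: t => simp [pvPre]

theorem pvW_iff (ps : List (Char × Char)) :
    pvW ps = true ↔ ∃ k : Nat, k + 3 ≤ ps.length ∧
      pvGoodp (ps.getD k ('0', '0')) = true ∧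
      pvGoodp (ps.getD (k + 1) ('0', '0')) = true ∧
      pvGoodp (ps.getD (k + 2) ('0', '0')) = true := by
  induction ps with
  | nil => simp [pvW]
  | cons p ps ih =>
    rw [pvW_cons]
    constructor
    · intro h
      rcases Bool.or_eq_true_iff.mp h with h | h
      · obtain ⟨hp, hpre⟩ := Bool.and_eq_true_iff.mp h
        obtain ⟨hl, h0, h1⟩ := (pvPre_two_iff ps).mp hpre
        exact ⟨0, by simp; omega, by simpa using hp, by simpa using h0, by simpa using h1⟩
      · obtain ⟨k, hk, h0, h1, h2⟩ := ih.mp h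
        exact ⟨k + 1, by simp; omega, by simpa using h0, by simpa using h1, by simpa using h2⟩
    · rintro ⟨k, hk, h0, h1, h2⟩
      cases k with
      | zero =>
        apply Bool.or_eq_true_iff.mpr; left
        apply Bool.and_eq_true_iff.mpr
        refine ⟨by simpa using h0, (pvPre_two_iff ps).mpr ⟨by simp at hk; omega, by simpa using h1, by simpa using h2⟩⟩
      | succ k =>
        apply Bool.or_eq_true_iff.mpr; right
        exact ih.mpr ⟨k, by simp at hk; omega, by simpa using h0, by simpa using h1, by simpa using h2⟩

theorem pvZip_getD (ds : List Char) (k : Nat) (h : k + 2 ≤ ds.length) :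
    pvGoodp ((ds.zip ds.tail).getD k ('0', '0')) = pvStep ds k := by
  have hz : k < (ds.zip ds.tail).length := by
    rw [List.length_zip, List.length_tail]; omega
  have h1 : k < ds.length := by omega
  have h2 : k + 1 < ds.length := by omega
  rw [List.getD_eq_getElem _ _ hz]
  unfold pvGoodp pvStep
  rw [List.getElem_zip, List.getElem_tail,
    List.getD_eq_getElem _ _ h1, List.getD_eq_getElem _ _ h2]

theorem pvInner_eq (ds : List Char) (hd : ∀ c ∈ ds, PySem.Chars.isdigit c = true)
    (k : Nat) (hk : k + 4 ≤ ds.length) :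
    ((PySem.List.pyRange (k : Int) ((k : Int) + 3)).filter (fun j =>
        PySem.Chars.isdigit (PySem.List.pyGetD ds j '0') &&
        PySem.Chars.isdigit (PySem.List.pyGetD ds (j + 1) '0'))).all (fun j =>
      pvInt1 (PySem.List.pyGetD ds (j + 1) '0') - pvInt1 (PySem.List.pyGetD ds j '0') == 1)
    = (pvStep ds k && pvStep ds (k + 1) && pvStep ds (k + 2)) := by
  have hrange : PySem.List.pyRange (k : Int) ((k : Int) + 3)
      = [(k : Int), (k : Int) + 1, (k : Int) + 1 + 1] := by
    rw [PySem.List.pyRange_one_cons (by omega), PySem.List.pyRange_one_cons (by omega),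
        PySem.List.pyRange_one_cons (by omega), PySem.List.pyRange_one]
    norm_num
    omega
  have hg : ∀ j : Nat, j < ds.length →
      PySem.List.pyGetD ds (j : Int) '0' = ds.getD j '0' := by
    intro j hj; simp [PySem.List.pyGetD_natCast]
  have e1 : ((k + 1 : Nat) : Int) = ((k : Int)) + 1 := by push_cast; ring
  have e2 : ((k + 2 : Nat) : Int) = ((k : Int)) + 1 + 1 := by push_cast; ring
  have e3 : ((k + 3 : Nat) : Int) = ((k : Int)) + 1 + 1 + 1 := by push_cast; ring
  have g0 := hg k (by omega)
  have g1 := hg (k+1) (by omega); rw [e1] at g1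
  have g2 := hg (k+2) (by omega); rw [e2] at g2
  have g3 := hg (k+3) (by omega); rw [e3] at g3
  have D : ∀ j : Nat, j < ds.length → PySem.Chars.isdigit (ds.getD j '0') = true := by
    intro j hj
    rw [List.getD_eq_getElem _ _ hj]
    exact hd _ (List.getElem_mem _)
  rw [hrange]
  simp only [List.filter_cons, List.filter_nil, g0, g1, g2, g3, D k (by omega),
    D (k+1) (by omega), D (k+2) (by omega), D (k+3) (by omega), Bool.and_self, if_true,
    List.all_cons, List.all_nil]
  simp [pvStep, Bool.and_assoc, show k+1+1 = k+2 from rfl, show k+2+1 = k+3 from rfl]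

theorem pvA_iff (ds : List Char) (hd : ∀ c ∈ ds, PySem.Chars.isdigit c = true)
    (_hn : 4 < ds.length) :
    ((PySem.List.pyRange 0 ((ds.length : Int) - 3)).any (fun i =>
      ((PySem.List.pyRange i (i + 3)).filter (fun j =>
          PySem.Chars.isdigit (PySem.List.pyGetD ds j '0') &&
          PySem.Chars.isdigit (PySem.List.pyGetD ds (j + 1) '0'))).all (fun j =>
        pvInt1 (PySem.List.pyGetD ds (j + 1) '0') - pvInt1 (PySem.List.pyGetD ds j '0') == 1)))
    = true ↔ ∃ k : Nat, k + 4 ≤ ds.length ∧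
        pvStep ds k = true ∧ pvStep ds (k + 1) = true ∧ pvStep ds (k + 2) = true := by
  rw [List.any_eq_true]
  constructor
  · rintro ⟨i, hmem, hin⟩
    obtain ⟨h0, h3⟩ := PySem.List.mem_pyRange_one.mp hmem
    obtain ⟨k, rfl⟩ : ∃ k : Nat, i = (k : Int) := ⟨i.toNat, (Int.toNat_of_nonneg h0).symm⟩
    have hk : k + 4 ≤ ds.length := by omega
    rw [pvInner_eq ds hd k hk] at hin
    simp only [Bool.and_eq_true] at hin
    exact ⟨k, hk, hin.1.1, hin.1.2, hin.2⟩
  · rintro ⟨k, hk, h1, h2, h3⟩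
    refine ⟨(k : Int), PySem.List.mem_pyRange_one.mpr ⟨by omega, by omega⟩, ?_⟩
    rw [pvInner_eq ds hd k hk]
    simp [h1, h2, h3]

-- ===== VERDICT (by name: the statement is the Claim_ definition above) =====
theorem check_sequential_py_spec : Claim_equal_check_sequential_py := by
  intro token _
  unfold Spec_check_sequential_py check_sequential_py check_sequential_py_alt
  set ds := token.toList.filter (fun c => PySem.Chars.isdigit c) with hds
  by_cases hn : 4 < ds.length
  · simp only [if_pos hn]
    have hd : ∀ c ∈ ds, PySem.Chars.isdigit c = true := by
      intro c hc; exact (List.mem_filter.mp (hds ▸ hc)).2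
    rw [Bool.eq_iff_iff]
    rw [pvA_iff ds hd hn, (pvRunLoop_eq_pvW (ds.zip ds.tail)).2.2, pvW_iff]
    have hlen : (ds.zip ds.tail).length = ds.length - 1 := by
      rw [List.length_zip, List.length_tail]; omega
    constructor
    · rintro ⟨k, hk, h1, h2, h3⟩
      exact ⟨k, by omega, by rw [pvZip_getD ds k (by omega)]; exact h1,
        by rw [pvZip_getD ds (k+1) (by omega)]; exact h2,
        by rw [pvZip_getD ds (k+2) (by omega)]; exact h3⟩
    · rintro ⟨k, hk, h1, h2, h3⟩
      rw [hlen] at hk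
      exact ⟨k, by omega, by rw [← pvZip_getD ds k (by omega)]; exact h1,
        by rw [← pvZip_getD ds (k+1) (by omega)]; exact h2,
        by rw [← pvZip_getD ds (k+2) (by omega)]; exact h3⟩
  · simp only [if_neg hn]
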